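-- pv_equiv track=rewrite | github.com/smasal23/python_foundation_examples | strings/odd_even_digits.py | print_even_odd
-- ===== SOURCE A (Python) =====
-- def print_even_odd(N):
--     Even_list = []
--     Odd_list = []
--     for i in str(abs(N)):
--         if int(i) % 2 == 0:
--             Even_list.append(i)
--         else:
--             Odd_list.append(i)
--
--     even_list = sorted(Even_list)
--     odd_list = sorted(Odd_list)
--
--     return even_list, odd_list
-- ===== SOURCE B (Python) =====
-- def print_even_odd(N):
--     counts = {}
--     for ch in str(abs(N)):
--         counts[ch] = counts.get(ch, 0) + 1
--     even_list = []
--     odd_list = []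
--     for d in "02468":
--         even_list += [d] * counts.get(d, 0)
--     for d in "13579":
--         odd_list += [d] * counts.get(d, 0)
--     return even_list, odd_list
-- ===== Notes on version B (the rewrite author's own statement) =====
-- stated objective: alternative
-- what changed: B replaces A's partition-then-sort-twice scheme with a counting sort: it builds one digit-frequency dict in a single pass and then emits the even and odd digit characters in ascending order directly from the counts, so no comparison sort is performed at all.
import Mathlib
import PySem

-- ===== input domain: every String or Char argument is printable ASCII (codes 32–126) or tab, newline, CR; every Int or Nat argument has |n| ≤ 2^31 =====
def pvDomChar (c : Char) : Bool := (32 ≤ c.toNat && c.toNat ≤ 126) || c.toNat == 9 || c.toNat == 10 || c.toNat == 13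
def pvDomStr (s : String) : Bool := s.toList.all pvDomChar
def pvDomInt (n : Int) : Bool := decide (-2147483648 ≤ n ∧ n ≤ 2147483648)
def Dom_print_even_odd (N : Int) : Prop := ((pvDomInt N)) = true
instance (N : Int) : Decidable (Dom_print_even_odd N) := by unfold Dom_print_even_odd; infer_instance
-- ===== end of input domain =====

-- B replaces A's partition-then-sort-twice scheme with a counting sort: one digit-frequency
-- dict built in a single pass, then the even/odd digit characters emitted in ascending order
-- directly from the counts (no comparison sort).

-- ===== PORT A =====
-- for i in str(abs(N)): partition into Even_list/Odd_list, then sort each.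
-- int(i) is ported as (PySem.Int.ofChars? [i]).getD 0: i is always a digit of str(abs(N)),
-- so ofChars? is never none and the default is never taken (exact on every reachable input).
def print_even_odd (N : Int) : List String × List String :=
  let s := PySem.Int.toChars (Int.natAbs N : Int)
  let p := s.foldl (fun (acc : List String × List String) i =>
      if PySem.Int.mod ((PySem.Int.ofChars? [i]).getD 0) 2 = 0
      then (acc.1 ++ [String.ofList [i]], acc.2)
      else (acc.1, acc.2 ++ [String.ofList [i]])) ([], [])
  (PySem.List.sorted p.1 (fun x => x) false, PySem.List.sorted p.2 (fun x => x) false)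

-- ===== PORT B =====
-- for d in "02468": even_list += [d] * counts.get(d, 0)   (and likewise "13579")
def peoBlocks (cnt : PySem.Dict String Int) (ds : List Char) : List String :=
  ds.foldl (fun acc d => acc ++ List.replicate (cnt.getD (String.ofList [d]) 0).toNat (String.ofList [d])) []

-- counts = {}; for ch in str(abs(N)): counts[ch] = counts.get(ch, 0) + 1
def print_even_odd_alt (N : Int) : List String × List String :=
  let cnt := (PySem.Int.toChars (Int.natAbs N : Int)).foldl
      (fun (d : PySem.Dict String Int) ch =>
        d.insert (String.ofList [ch]) (d.getD (String.ofList [ch]) 0 + 1)) PySem.Dict.empty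
  (peoBlocks cnt ['0', '2', '4', '6', '8'], peoBlocks cnt ['1', '3', '5', '7', '9'])

-- ===== PRECONDITION & SPEC =====
def Spec_print_even_odd (N : Int) (out : List String × List String) : Prop := out = print_even_odd_alt N
instance (N : Int) (out : List String × List String) : Decidable (Spec_print_even_odd N out) := by unfold Spec_print_even_odd; infer_instance

-- ===== CLAIM (what is proved, stated in full; the proofs are below) =====
def Claim_equal_print_even_odd : Prop := ∀ (N : Int), Dom_print_even_odd N → Spec_print_even_odd N (print_even_odd N)

-- ===== LEMMAS AND PROOFS =====

-- every character produced by Nat.toDigitsCore is a digit (or came from the accumulator)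
theorem peo_toDigitsCore_mem (fuel : Nat) : ∀ (n : Nat) (ds : List Char) (c : Char),
    c ∈ Nat.toDigitsCore 10 fuel n ds → c ∈ ds ∨ c.isDigit := by
  induction fuel with
  | zero => intro n ds c h; simp [Nat.toDigitsCore] at h; exact Or.inl h
  | succ f ih =>
    intro n ds c h
    rw [Nat.toDigitsCore] at h
    have hdig : (n % 10).digitChar.isDigit := by
      have : n % 10 < 10 := Nat.mod_lt _ (by norm_num)
      interval_cases (n % 10) <;> decide
    by_cases hz : n / 10 = 0
    · simp [hz] at h
      rcases h with h | h
      · exact Or.inr (h ▸ hdig)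
      · exact Or.inl h
    · simp [hz] at h
      rcases ih (n / 10) _ c h with h' | h'
      · rcases List.mem_cons.mp h' with h'' | h''
        · exact Or.inr (h'' ▸ hdig)
        · exact Or.inl h''
      · exact Or.inr h'

theorem peo_digits (n : Nat) (c : Char) (h : c ∈ Nat.toDigits 10 n) : c.isDigit := by
  rcases peo_toDigitsCore_mem _ _ _ _ h with h' | h'
  · simp at h'
  · exact h'

theorem peo_digits_abs (N : Int) : ∀ c ∈ PySem.Int.toChars (Int.natAbs N : Int), c.isDigit := by
  intro c hc
  have h0 : ¬ ((Int.natAbs N : Int) < 0) := by omega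
  simp only [PySem.Int.toChars, if_neg h0] at hc
  exact peo_digits _ _ hc

theorem peo_mem_digitList (c : Char) (h : c.isDigit) :
    c ∈ ['0', '1', '2', '3', '4', '5', '6', '7', '8', '9'] := by
  have h1 : 48 ≤ c.toNat ∧ c.toNat ≤ 57 := by simpa [Char.isDigit] using h
  obtain ⟨hl, hu⟩ := h1
  rw [(Char.ofNat_toNat c).symm]
  interval_cases (c.toNat) <;> decide

theorem peo_mk_inj {a b : Char} (h : String.ofList [a] = String.ofList [b]) : a = b := by
  have := congrArg String.toList h
  simpa using this

-- characterisation of A's partition loop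
theorem peo_foldl_part (q : Char → Prop) [DecidablePred q] :
    ∀ (l : List Char) (a b : List String),
    l.foldl (fun (acc : List String × List String) i =>
        if q i then (acc.1 ++ [String.ofList [i]], acc.2)
        else (acc.1, acc.2 ++ [String.ofList [i]])) (a, b)
      = (a ++ (l.filter (fun c => decide (q c))).map (fun c => String.ofList [c]),
         b ++ (l.filter (fun c => !decide (q c))).map (fun c => String.ofList [c])) := by
  intro l
  induction l with
  | nil => intro a b; simp
  | cons c t ih =>
    intro a b
    by_cases h : q c <;> simp [h, ih]

-- a flatMap of replicate blocks in ascending key order is Pairwise (· ≤ ·)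
theorem peo_pairwise_blocks (f : Char → String) (n : Char → Nat) :
    ∀ (ds : List Char), List.Pairwise (fun a b => f a ≤ f b) ds →
    List.Pairwise (· ≤ ·) (ds.flatMap fun d => List.replicate (n d) (f d)) := by
  intro ds
  induction ds with
  | nil => intro _; simp
  | cons d t ih =>
    intro h
    rw [List.pairwise_cons] at h
    rw [List.flatMap_cons, List.pairwise_append]
    refine ⟨List.pairwise_replicate.mpr (Or.inr le_rfl), ih h.2, ?_⟩
    intro a ha b hb
    rw [List.eq_of_mem_replicate ha]
    rcases List.mem_flatMap.mp hb with ⟨d', hd', hb'⟩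
    rw [List.eq_of_mem_replicate hb']
    exact h.1 d' hd'

-- bumping the count of one key c ∈ ds inserts one extra copy of f c (up to permutation)
theorem peo_bump (f : Char → String) (n : Char → Nat) (c : Char) :
    ∀ (ds : List Char), ds.Nodup → c ∈ ds →
    (ds.flatMap fun d => List.replicate (n d + if d = c then 1 else 0) (f d)).Perm
      (f c :: ds.flatMap fun d => List.replicate (n d) (f d)) := by
  intro ds
  induction ds with
  | nil => intro _ h; simp at h
  | cons d t ih =>
    intro hnd hc
    rw [List.nodup_cons] at hnd
    rcases List.mem_cons.mp hc with rfl | hc'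
    · rw [List.flatMap_cons, List.flatMap_cons, if_pos rfl]
      have hrw : (t.flatMap fun d' => List.replicate (n d' + if d' = c then 1 else 0) (f d'))
          = t.flatMap fun d' => List.replicate (n d') (f d') := by
        apply List.flatMap_congr
        intro d' hd'
        have hne : d' ≠ c := fun h => hnd.1 (h ▸ hd')
        rw [if_neg hne, Nat.add_zero]
      rw [hrw, List.replicate_succ]
      exact List.Perm.refl _
    · have hd : d ≠ c := fun h => hnd.1 (h ▸ hc')
      rw [List.flatMap_cons, List.flatMap_cons, if_neg hd, Nat.add_zero]
      exact (List.Perm.append_left _ (ih hnd.2 hc')).trans List.perm_middle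

-- the replicate blocks are a permutation of the filtered, mk-mapped digits
theorem peo_perm (q : Char → Bool) (ds : List Char) (hnd : ds.Nodup)
    (hq : ∀ c, c.isDigit → (q c = true ↔ c ∈ ds)) :
    ∀ (s : List Char), (∀ c ∈ s, c.isDigit) →
    (ds.flatMap fun d =>
        List.replicate ((s.map (fun c => String.ofList [c])).count (String.ofList [d])) (String.ofList [d])).Perm
      ((s.filter q).map (fun c => String.ofList [c])) := by
  intro s
  induction s with
  | nil => intro _; simp
  | cons c t ih =>
    intro hdig
    have hc : c.isDigit := hdig c (List.mem_cons_self ..)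
    have ht : ∀ x ∈ t, x.isDigit := fun x hx => hdig x (List.mem_cons_of_mem _ hx)
    have hcount : ∀ d : Char,
        ((c :: t).map (fun x => String.ofList [x])).count (String.ofList [d])
          = (t.map (fun x => String.ofList [x])).count (String.ofList [d]) + if d = c then 1 else 0 := by
      intro d
      rw [List.map_cons, List.count_cons]
      by_cases h : d = c
      · simp [h]
      · have hne2 : ¬ String.ofList [c] = String.ofList [d] := fun hh => h (peo_mk_inj hh).symm
        simp [hne2, h]
    by_cases hqc : q c = true
    · have hmem : c ∈ ds := (hq c hc).mp hqc
      have hrw : (ds.flatMap fun d =>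
          List.replicate (((c :: t).map (fun x => String.ofList [x])).count (String.ofList [d])) (String.ofList [d]))
          = ds.flatMap fun d =>
            List.replicate ((t.map (fun x => String.ofList [x])).count (String.ofList [d])
              + if d = c then 1 else 0) (String.ofList [d]) := by
        apply List.flatMap_congr
        intro d _
        rw [hcount d]
      rw [hrw, List.filter_cons_of_pos hqc, List.map_cons]
      exact (peo_bump _ _ c ds hnd hmem).trans ((ih ht).cons _)
    · have hnmem : c ∉ ds := fun h => hqc ((hq c hc).mpr h)
      have hrw : (ds.flatMap fun d =>
          List.replicate (((c :: t).map (fun x => String.ofList [x])).count (String.ofList [d])) (String.ofList [d]))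
          = ds.flatMap fun d =>
            List.replicate ((t.map (fun x => String.ofList [x])).count (String.ofList [d])) (String.ofList [d]) := by
        apply List.flatMap_congr
        intro d hd
        rw [hcount d, if_neg (fun (h : d = c) => hnmem (h ▸ hd)), Nat.add_zero]
      rw [hrw, List.filter_cons_of_neg (by simp [hqc])]
      exact ih ht

theorem peo_pairwise_lit (ds : List Char)
    (h : List.Pairwise (fun a b => ([a] : List Char) < [b]) ds) :
    List.Pairwise (fun a b => String.ofList [a] ≤ String.ofList [b]) ds := by
  refine h.imp ?_
  intro a b hab
  refine le_of_lt (String.lt_iff_toList_lt.mpr ?_)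
  simpa using hab

-- sorting the filtered digits IS the counting-sort emission
theorem peo_main (q : Char → Bool) (ds : List Char) (hnd : ds.Nodup)
    (hds : List.Pairwise (fun a b => String.ofList [a] ≤ String.ofList [b]) ds)
    (hq : ∀ c, c.isDigit → (q c = true ↔ c ∈ ds))
    (s : List Char) (hs : ∀ c ∈ s, c.isDigit) :
    PySem.List.sorted ((s.filter q).map (fun c => String.ofList [c])) (fun x => x) false
      = ds.flatMap fun d =>
        List.replicate ((s.map (fun c => String.ofList [c])).count (String.ofList [d])) (String.ofList [d]) :=
  PySem.List.sorted_id_eq_of_perm_of_pairwise _ _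
    (peo_perm q ds hnd hq s hs)
    (peo_pairwise_blocks _ _ ds hds)

theorem peo_q_even : ∀ c : Char, c.isDigit →
    ((fun i => decide (PySem.Int.mod ((PySem.Int.ofChars? [i]).getD 0) 2 = 0)) c = true
      ↔ c ∈ ['0', '2', '4', '6', '8']) := by
  intro c hc
  have := peo_mem_digitList c hc
  fin_cases this <;> simp <;> decide

theorem peo_q_odd : ∀ c : Char, c.isDigit →
    ((fun i => !decide (PySem.Int.mod ((PySem.Int.ofChars? [i]).getD 0) 2 = 0)) c = true
      ↔ c ∈ ['1', '3', '5', '7', '9']) := by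
  intro c hc
  have := peo_mem_digitList c hc
  fin_cases this <;> simp <;> decide

-- B's dict is the counter of the mk-mapped digits, and peoBlocks is the flatMap of replicates
theorem peo_alt_eq (N : Int) :
    print_even_odd_alt N =
      (( ['0', '2', '4', '6', '8'].flatMap fun d =>
          List.replicate (((PySem.Int.toChars (Int.natAbs N : Int)).map
            (fun c => String.ofList [c])).count (String.ofList [d])) (String.ofList [d])),
       ( ['1', '3', '5', '7', '9'].flatMap fun d =>
          List.replicate (((PySem.Int.toChars (Int.natAbs N : Int)).map
            (fun c => String.ofList [c])).count (String.ofList [d])) (String.ofList [d]))) := by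
  have hcnt : (PySem.Int.toChars (Int.natAbs N : Int)).foldl
      (fun (d : PySem.Dict String Int) ch =>
        d.insert (String.ofList [ch]) (d.getD (String.ofList [ch]) 0 + 1)) PySem.Dict.empty
      = PySem.Dict.counter ((PySem.Int.toChars (Int.natAbs N : Int)).map (fun c => String.ofList [c])) := by
    rw [← PySem.Dict.foldl_insert_getD_add_one_eq_counter, List.foldl_map]
  simp only [print_even_odd_alt, peoBlocks]
  rw [hcnt, PySem.List.foldl_append_eq_flatMap, PySem.List.foldl_append_eq_flatMap]
  simp only [PySem.Dict.getD_counter, Int.toNat_natCast, List.nil_append]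

-- ===== VERDICT (by name: the statement is the Claim_ definition above) =====
theorem print_even_odd_spec : Claim_equal_print_even_odd := by
  intro N _
  unfold Spec_print_even_odd
  rw [peo_alt_eq]
  simp only [print_even_odd]
  rw [peo_foldl_part (fun i => PySem.Int.mod ((PySem.Int.ofChars? [i]).getD 0) 2 = 0)]
  simp only [List.nil_append]
  refine Prod.ext ?_ ?_
  · exact peo_main _ _ (by decide) (peo_pairwise_lit _ (by decide)) peo_q_even _ (peo_digits_abs N)
  · exact peo_main _ _ (by decide) (peo_pairwise_lit _ (by decide)) peo_q_odd _ (peo_digits_abs N)
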